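-- pv_equiv track=rewrite | github.com/clearfunction/ai-pipeline-v2 | lambdas/story-execution/build-orchestrator/lambda_function.py | _extract_eresolve_error
-- ===== SOURCE A (Python) =====
-- def _extract_eresolve_error(output: str) -> str:
--     """Extract ERESOLVE error details."""
--     lines = output.split('\n')
--     eresolve_section = []
--     in_eresolve = False
--
--     for line in lines:
--         if 'ERESOLVE' in line:
--             in_eresolve = True
--         if in_eresolve:
--             eresolve_section.append(line)
--             if 'Fix the upstream dependency conflict' in line:
--                 break
--
--     return '\n'.join(eresolve_section[:10])  # Limit output
-- ===== SOURCE B (Python) =====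
-- def _extract_eresolve_error(output: str) -> str:
--     """Extract ERESOLVE error details (index + slice formulation)."""
--     lines = output.split('\n')
--     start = next((i for i, line in enumerate(lines) if 'ERESOLVE' in line), None)
--     if start is None:
--         return ''
--     rest = lines[start:]
--     end = next((k for k, line in enumerate(rest)
--                 if 'Fix the upstream dependency conflict' in line), None)
--     section = rest if end is None else rest[:end + 1]
--     return '\n'.join(section[:10])
-- ===== Notes on version B (the rewrite author's own statement) =====
-- stated objective: simpler
-- what changed: Replaces the per-line boolean-flag accumulator loop with index location (first line containing 'ERESOLVE') plus a forward search for the fix line and list slicing.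
import Mathlib
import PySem

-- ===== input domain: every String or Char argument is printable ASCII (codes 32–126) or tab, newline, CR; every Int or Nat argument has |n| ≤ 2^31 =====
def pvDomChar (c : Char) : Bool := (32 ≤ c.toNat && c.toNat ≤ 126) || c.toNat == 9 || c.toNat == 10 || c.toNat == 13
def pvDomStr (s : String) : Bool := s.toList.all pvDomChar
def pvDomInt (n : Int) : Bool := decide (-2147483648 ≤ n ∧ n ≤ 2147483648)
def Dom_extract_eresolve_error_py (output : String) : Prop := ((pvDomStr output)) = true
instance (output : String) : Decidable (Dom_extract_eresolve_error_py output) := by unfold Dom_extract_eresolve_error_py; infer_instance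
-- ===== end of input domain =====

-- B replaces A's per-line boolean-flag accumulator loop with index location plus slicing (objective: simpler).


-- ===== PORT A =====
-- the for-loop with its in_eresolve flag and the 'break' (break = return the accumulator)
def extractLoopA : List String → List String → Bool → List String
  | [], acc, _ => acc
  | l :: ls, acc, inE =>
    let inE' := if PySem.Str.isIn "ERESOLVE" l then true else inE
    if inE' then
      let acc' := acc ++ [l]
      if PySem.Str.isIn "Fix the upstream dependency conflict" l then acc'
      else extractLoopA ls acc' inE'
    else extractLoopA ls acc inE'

def extract_eresolve_error_py (output : String) : String :=
  let lines := (PySem.Str.split? output "\n").getD []   -- sep "\n" ≠ "": split? is always some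
  let eresolve_section := extractLoopA lines [] false
  PySem.Str.join "\n" (eresolve_section.take 10)

-- ===== PORT B =====
def extract_eresolve_error_py_alt (output : String) : String :=
  let lines := (PySem.Str.split? output "\n").getD []   -- sep "\n" ≠ "": split? is always some
  match lines.findIdx? (fun l => PySem.Str.isIn "ERESOLVE" l) with
  | none => ""
  | some start =>
    let rest := lines.drop start
    let section_ :=
      match rest.findIdx? (fun l => PySem.Str.isIn "Fix the upstream dependency conflict" l) with
      | none => rest
      | some k => rest.take (k + 1)
    PySem.Str.join "\n" (section_.take 10)

-- ===== PRECONDITION & SPEC =====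
def Spec_extract_eresolve_error_py (output : String) (out : String) : Prop := out = extract_eresolve_error_py_alt output
instance (output : String) (out : String) : Decidable (Spec_extract_eresolve_error_py output out) := by unfold Spec_extract_eresolve_error_py; infer_instance

-- ===== CLAIM (what is proved, stated in full; the proofs are below) =====
def Claim_equal_extract_eresolve_error_py : Prop := ∀ (output : String), Dom_extract_eresolve_error_py output → Spec_extract_eresolve_error_py output (extract_eresolve_error_py output)

-- ===== LEMMAS AND PROOFS =====

-- the lines collected once the flag is set: everything up to and including the first fix line
def collectFix : List String → List String
  | [] => []
  | l :: ls =>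
    if PySem.Str.isIn "Fix the upstream dependency conflict" l then [l]
    else l :: collectFix ls

theorem extractLoopA_true (ls : List String) (acc : List String) :
    extractLoopA ls acc true = acc ++ collectFix ls := by
  induction ls generalizing acc with
  | nil => simp [extractLoopA, collectFix]
  | cons l ls ih =>
    simp only [extractLoopA, ite_self]
    rw [if_pos trivial]
    by_cases h : PySem.Str.isIn "Fix the upstream dependency conflict" l = true
    · rw [if_pos h, collectFix, if_pos h]
    · rw [if_neg h, ih, collectFix, if_neg h, List.append_assoc]
      rfl

theorem take_findIdx_eq_collectFix (ls : List String) :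
    (match ls.findIdx? (fun l => PySem.Str.isIn "Fix the upstream dependency conflict" l) with
      | none => ls
      | some k => ls.take (k + 1)) = collectFix ls := by
  induction ls with
  | nil => rfl
  | cons l ls ih =>
    rw [List.findIdx?_cons]
    by_cases h : PySem.Str.isIn "Fix the upstream dependency conflict" l = true
    · simp only [h, if_true, collectFix, List.take_succ_cons, List.take_zero]
    · simp only [Bool.not_eq_true] at h
      simp only [h, Bool.false_eq_true, if_false, collectFix]
      cases hf : ls.findIdx? (fun l => PySem.Str.isIn "Fix the upstream dependency conflict" l) with
      | none =>
        rw [hf] at ih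
        show l :: ls = l :: collectFix ls
        exact congrArg (l :: ·) ih
      | some k =>
        rw [hf] at ih
        show List.take (k + 1 + 1) (l :: ls) = l :: collectFix ls
        rw [List.take_succ_cons]
        exact congrArg (l :: ·) ih

theorem main_on_lines (lines : List String) :
    PySem.Str.join "\n" ((extractLoopA lines [] false).take 10) =
    (match lines.findIdx? (fun l => PySem.Str.isIn "ERESOLVE" l) with
      | none => ""
      | some start =>
        let rest := lines.drop start
        let section_ :=
          match rest.findIdx? (fun l => PySem.Str.isIn "Fix the upstream dependency conflict" l) with
          | none => rest
          | some k => rest.take (k + 1)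
        PySem.Str.join "\n" (section_.take 10)) := by
  induction lines with
  | nil => rfl
  | cons l ls ih =>
    by_cases hE : PySem.Str.isIn "ERESOLVE" l = true
    · -- flag turns on at l
      have hA : extractLoopA (l :: ls) [] false = collectFix (l :: ls) := by
        show (if (if PySem.Str.isIn "ERESOLVE" l = true then true else false) = true then
                if PySem.Str.isIn "Fix the upstream dependency conflict" l = true then [] ++ [l]
                else extractLoopA ls ([] ++ [l]) (if PySem.Str.isIn "ERESOLVE" l = true then true else false)
              else extractLoopA ls [] (if PySem.Str.isIn "ERESOLVE" l = true then true else false)) =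
             collectFix (l :: ls)
        rw [if_pos hE]
        by_cases hF : PySem.Str.isIn "Fix the upstream dependency conflict" l = true
        · rw [if_pos rfl, if_pos hF, collectFix, if_pos hF]; rfl
        · rw [if_pos rfl, if_neg hF, extractLoopA_true, collectFix, if_neg hF]; rfl
      have hP : (l :: ls).findIdx? (fun l => PySem.Str.isIn "ERESOLVE" l) = some 0 := by
        rw [List.findIdx?_cons]; simp only [hE, if_true]
      rw [hA, hP]
      exact congrArg (fun s => PySem.Str.join "\n" (s.take 10))
        (take_findIdx_eq_collectFix (l :: ls)).symm
    · -- flag stays off; both sides reduce to the tail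
      simp only [Bool.not_eq_true] at hE
      have hA : extractLoopA (l :: ls) [] false = extractLoopA ls [] false := by
        show (if (if PySem.Str.isIn "ERESOLVE" l = true then true else false) = true then
                if PySem.Str.isIn "Fix the upstream dependency conflict" l = true then [] ++ [l]
                else extractLoopA ls ([] ++ [l]) (if PySem.Str.isIn "ERESOLVE" l = true then true else false)
              else extractLoopA ls [] (if PySem.Str.isIn "ERESOLVE" l = true then true else false)) =
             extractLoopA ls [] false
        simp only [hE, Bool.false_eq_true, if_false]
      have hP : (l :: ls).findIdx? (fun l => PySem.Str.isIn "ERESOLVE" l) =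
          Option.map (· + 1) (ls.findIdx? (fun l => PySem.Str.isIn "ERESOLVE" l)) := by
        rw [List.findIdx?_cons]; simp only [hE, Bool.false_eq_true, if_false]
      rw [hA, ih, hP]
      cases hf : ls.findIdx? (fun l => PySem.Str.isIn "ERESOLVE" l) with
      | none => rfl
      | some i => rfl

-- ===== VERDICT (by name: the statement is the Claim_ definition above) =====
theorem extract_eresolve_error_py_spec : Claim_equal_extract_eresolve_error_py := by
  intro output _
  unfold Spec_extract_eresolve_error_py extract_eresolve_error_py extract_eresolve_error_py_alt
  exact main_on_lines _
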